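-- pv_equiv track=rewrite | github.com/ITech7750/flask_api | regression_service.py | filter_arrays
-- ===== SOURCE A (Python) =====
-- def filter_arrays(arr, max_val):
--     second_elements = {}
--     for sublist in arr:
--         if sublist[1] not in second_elements:
--             second_elements[sublist[1]] = 1
--         else:
--             second_elements[sublist[1]] += 1
--
--     max_count = max(second_elements.values())
--     most_common_elements = [key for key, value in second_elements.items() if value == max_count]
--     return [sub_arr for sub_arr in arr if sub_arr[1] == most_common_elements[0]]
-- ===== SOURCE B (Python) =====
-- def filter_arrays(arr, max_val):
--     groups = {}
--     for sublist in arr: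
--         groups.setdefault(sublist[1], []).append(sublist)
--     return max(groups.values(), key=len)
-- ===== Notes on version B (the rewrite author's own statement) =====
-- stated objective: simpler
-- what changed: B builds one dict grouping the sublists by their second element in a single pass and returns the largest group directly via max(key=len), eliminating A's count dict, the max-count scan, the most-common-keys comprehension and the final filtering pass over arr.
import Mathlib
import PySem

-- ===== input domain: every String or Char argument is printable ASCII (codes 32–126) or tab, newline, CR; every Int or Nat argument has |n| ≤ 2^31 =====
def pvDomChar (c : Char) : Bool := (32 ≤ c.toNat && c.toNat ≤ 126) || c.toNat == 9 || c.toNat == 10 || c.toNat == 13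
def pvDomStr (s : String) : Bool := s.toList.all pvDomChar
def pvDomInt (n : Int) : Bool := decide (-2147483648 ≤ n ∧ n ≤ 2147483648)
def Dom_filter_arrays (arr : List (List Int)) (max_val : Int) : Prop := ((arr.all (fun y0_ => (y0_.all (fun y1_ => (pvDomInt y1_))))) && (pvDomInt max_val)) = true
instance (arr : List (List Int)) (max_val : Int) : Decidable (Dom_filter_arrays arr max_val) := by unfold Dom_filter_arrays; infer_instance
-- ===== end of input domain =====

-- B replaces A's count-dict + max + key-comprehension + final filter over arr by a single
-- grouping pass and a direct max-by-length over the groups (objective: simpler).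

-- ===== PORT A =====
def filter_arrays (arr : List (List Int)) (max_val : Int) : List (List Int) :=
  let second_elements : PySem.Dict Int Int :=
    arr.foldl (fun d sublist =>
      if !(d.contains (PySem.List.pyGetD sublist 1 0)) then
        d.insert (PySem.List.pyGetD sublist 1 0) 1
      else
        d.modify (PySem.List.pyGetD sublist 1 0) 0 (· + 1)) PySem.Dict.empty
  -- Python's max(...) raises on the empty dict; Pre_ excludes arr = [], so `.getD 0` is unreachable
  let max_count : Int := (PySem.List.max? second_elements.values (fun v => v)).getD 0
  let most_common_elements : List Int :=
    (second_elements.items.filter (fun p => p.2 == max_count)).map (fun p => p.1)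
  arr.filter (fun sub_arr => PySem.List.pyGetD sub_arr 1 0 == most_common_elements.headD 0)

-- ===== PORT B =====
def filter_arrays_alt (arr : List (List Int)) (max_val : Int) : List (List Int) :=
  let groups : PySem.Dict Int (List (List Int)) :=
    arr.foldl (fun d sublist =>
      d.modify (PySem.List.pyGetD sublist 1 0) [] (fun g => g ++ [sublist])) PySem.Dict.empty
  -- Python's max(...) raises on the empty dict; Pre_ excludes arr = [], so `.getD []` is unreachable
  (PySem.List.max? groups.values (fun g => (g.length : Int))).getD []

-- ===== PRECONDITION & SPEC =====
-- Pre_ excludes exactly the inputs on which A raises: the empty list (ValueError from max on an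
-- empty dict) and lists containing a sublist of length < 2 (IndexError from sublist[1]).
def Pre_filter_arrays (arr : List (List Int)) (max_val : Int) : Prop :=
  arr ≠ [] ∧ ∀ s ∈ arr, 2 ≤ s.length
instance (arr : List (List Int)) (max_val : Int) : Decidable (Pre_filter_arrays arr max_val) := by
  unfold Pre_filter_arrays; infer_instance
def pvWitness_filter_arrays : List (List Int) × Int := ([[1, 2], [3, 2], [4, 5]], 0)

def Spec_filter_arrays (arr : List (List Int)) (max_val : Int) (out : List (List Int)) : Prop := out = filter_arrays_alt arr max_val
instance (arr : List (List Int)) (max_val : Int) (out : List (List Int)) : Decidable (Spec_filter_arrays arr max_val out) := by unfold Spec_filter_arrays; infer_instance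

-- ===== CLAIM (what is proved, stated in full; the proofs are below) =====
def Claim_equal_filter_arrays : Prop := ∀ (arr : List (List Int)) (max_val : Int), Dom_filter_arrays arr max_val → Pre_filter_arrays arr max_val → Spec_filter_arrays arr max_val (filter_arrays arr max_val)

-- ===== LEMMAS AND PROOFS =====

-- the second element of a sublist, as both ports read it
def pvKey (s : List Int) : Int := PySem.List.pyGetD s 1 0

-- the step function of PySem.List.max?
def pvStep {α : Type} (key : α → Int) (acc : Option α) (x : α) : Option α :=
  match acc with
  | none => some x
  | some m => if key m < key x then some x else some m

theorem pvMax?_eq_foldl {α : Type} (key : α → Int) (xs : List α) :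
    PySem.List.max? xs key = xs.foldl (pvStep key) none := rfl

-- the running maximum's key never decreases
theorem pvFold_key_le {α : Type} (key : α → Int) :
    ∀ (T : List α) (a m : α), T.foldl (pvStep key) (some a) = some m → key a ≤ key m := by
  intro T
  induction T with
  | nil => intro a m h; cases h; exact le_refl _
  | cons y T ih =>
    intro a m h
    simp only [List.foldl_cons, pvStep] at h
    split at h
    · exact le_of_lt (lt_of_lt_of_le (by assumption) (ih y m h))
    · exact ih a m h

-- max? keeps the FIRST extremal element: it is the head of the filter by its key value
theorem pvFold_max_first {α : Type} (key : α → Int) :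
    ∀ (T : List α) (a m : α), T.foldl (pvStep key) (some a) = some m →
      ((a :: T).filter (fun c => key c == key m)).head? = some m := by
  intro T
  induction T with
  | nil =>
    intro a m h; cases h
    simp
  | cons y T ih =>
    intro a m h
    simp only [List.foldl_cons, pvStep] at h
    by_cases hlt : key a < key y
    · rw [if_pos hlt] at h
      have hym := pvFold_key_le key T y m h
      have ham : key a ≠ key m := ne_of_lt (lt_of_lt_of_le hlt hym)
      have := ih y m h
      simpa [ham] using this
    · rw [if_neg hlt] at h
      have := ih a m h
      by_cases ham : key a = key m
      · -- then a is the head of both filters, and the head is m (it is a)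
        have h1 : ((a :: T).filter (fun c => key c == key m)).head? = some m := this
        have ha : (a :: T).filter (fun c => key c == key m) =
            a :: T.filter (fun c => key c == key m) := by
          simp [ham]
        rw [ha] at h1
        have ham2 : a = m := by simpa using h1
        subst ham2
        simp [List.filter_cons]
      · have hym : key y ≠ key m := by
          have ham' := pvFold_key_le key T a m h
          have h1 : key a < key m := lt_of_le_of_ne ham' ham
          have h2 : key y ≤ key a := le_of_not_gt hlt
          exact ne_of_lt (lt_of_le_of_lt h2 h1)
        simp [ham, hym] at this ⊢
        exact this

-- commuting max? with a map, given the keys agree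
theorem pvFold_map {α β : Type} (grp : α → β) (keyb : β → Int) (h : α → Int) :
    ∀ (S : List α) (acc : Option α), (∀ c ∈ S, keyb (grp c) = h c) →
      (∀ a, acc = some a → keyb (grp a) = h a) →
      (S.map grp).foldl (pvStep keyb) (acc.map grp) = ((S.foldl (pvStep h) acc).map grp) := by
  intro S
  induction S with
  | nil => intro acc _ _; simp
  | cons x S ih =>
    intro acc hc hacc
    have hx : keyb (grp x) = h x := hc x (by simp)
    have hc' : ∀ c ∈ S, keyb (grp c) = h c := fun c hcS => hc c (by simp [hcS])
    simp only [List.map_cons, List.foldl_cons]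
    cases acc with
    | none =>
      have : (pvStep keyb (Option.map grp none) (grp x)) = Option.map grp (pvStep h none x) := by
        simp [pvStep]
      rw [this]
      exact ih _ hc' (by intro a ha; simp [pvStep] at ha; subst ha; exact hx)
    | some a =>
      have ha : keyb (grp a) = h a := hacc a rfl
      have : (pvStep keyb (Option.map grp (some a)) (grp x)) = Option.map grp (pvStep h (some a) x) := by
        simp only [pvStep, Option.map_some, hx, ha]
        split <;> simp
      rw [this]
      refine ih _ hc' ?_
      intro b hb
      simp only [pvStep] at hb
      split at hb <;> (cases hb; first | exact hx | exact ha)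

theorem pvMax?_map {α β : Type} (grp : α → β) (keyb : β → Int) (h : α → Int)
    (S : List α) (hc : ∀ c ∈ S, keyb (grp c) = h c) :
    PySem.List.max? (S.map grp) keyb = (PySem.List.max? S h).map grp := by
  rw [pvMax?_eq_foldl, pvMax?_eq_foldl]
  have := pvFold_map grp keyb h S none hc (by intro a ha; cases ha)
  simpa using this

theorem pvMax?_first {α : Type} (key : α → Int) (S : List α) (m : α)
    (h : PySem.List.max? S key = some m) :
    (S.filter (fun c => key c == key m)).head? = some m := by
  cases S with
  | nil => simp [PySem.List.max?] at h
  | cons x T =>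
    rw [pvMax?_eq_foldl] at h
    simp only [List.foldl_cons, pvStep] at h
    exact pvFold_max_first key T x m h

-- the group of sublists whose second element is c, in arr order
def pvGrp (arr : List (List Int)) (c : Int) : List (List Int) :=
  arr.filter (fun s => pvKey s == c)

-- the number of sublists whose second element is c
def pvCnt (arr : List (List Int)) (c : Int) : Int := ((arr.map pvKey).count c : Int)

theorem pvCnt_eq_len (arr : List (List Int)) (c : Int) :
    ((pvGrp arr c).length : Int) = pvCnt arr c := by
  rw [pvCnt, List.count_eq_countP, List.countP_map, pvGrp]
  norm_cast
  rw [List.countP_eq_length_filter]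
  rfl

theorem filter_arrays_eq (arr : List (List Int)) (max_val : Int) (hne : arr ≠ []) :
    filter_arrays arr max_val = filter_arrays_alt arr max_val := by
  have hks : arr.map pvKey ≠ [] := by simpa using hne
  -- A's counting loop builds Counter(arr.map pvKey)
  have hA : (arr.foldl (fun d sublist =>
      if !(d.contains (PySem.List.pyGetD sublist 1 0)) then
        d.insert (PySem.List.pyGetD sublist 1 0) 1
      else
        d.modify (PySem.List.pyGetD sublist 1 0) 0 (· + 1)) PySem.Dict.empty)
      = PySem.Dict.counter (arr.map pvKey) := by
    rw [PySem.Dict.counter_eq_foldl, List.foldl_map]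
    refine (PySem.List.foldl_congr_mem arr _ _ _ ?_).symm
    intro d s _
    by_cases hc : d.contains (PySem.List.pyGetD s 1 0)
    · simp [pvKey, hc]
    · simp only [Bool.not_eq_true] at hc
      simp [pvKey, hc, PySem.Dict.modify, PySem.Dict.getD_of_not_contains d 0 hc]
  have hitems : (PySem.Dict.counter (arr.map pvKey)).items
      = (PySem.Set.ofList (arr.map pvKey)).map (fun c => (c, pvCnt arr c)) := by
    simpa [pvCnt] using PySem.Dict.items_counter (arr.map pvKey)
  have hvalsA : (PySem.Dict.counter (arr.map pvKey)).values
      = (PySem.Set.ofList (arr.map pvKey)).map (pvCnt arr) := by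
    simp [PySem.Dict.values, hitems, Function.comp]
  have hSne : PySem.Set.ofList (arr.map pvKey) ≠ [] := by
    intro hSnil
    cases h : arr.map pvKey with
    | nil => exact hks h
    | cons x t =>
      have hx : x ∈ PySem.Set.ofList (arr.map pvKey) :=
        (PySem.Set.mem_ofList _ x).2 (by rw [h]; simp)
      rw [hSnil] at hx; simp at hx
  obtain ⟨m, hm⟩ : ∃ m, PySem.List.max? (PySem.Set.ofList (arr.map pvKey)) (pvCnt arr) = some m := by
    cases h : PySem.List.max? (PySem.Set.ofList (arr.map pvKey)) (pvCnt arr) with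
    | none => exact absurd ((PySem.List.max?_eq_none_iff _ _).1 h) hSne
    | some m => exact ⟨m, rfl⟩
  have hmax : PySem.List.max? ((PySem.Set.ofList (arr.map pvKey)).map (pvCnt arr)) (fun v => v)
      = some (pvCnt arr m) := by
    rw [pvMax?_map (pvCnt arr) (fun v => v) (pvCnt arr) _ (fun c _ => rfl), hm]; rfl
  have hmost : (((PySem.Set.ofList (arr.map pvKey)).map (fun c => (c, pvCnt arr c))).filter
        (fun p => p.2 == pvCnt arr m)).map (fun p => p.1)
      = (PySem.Set.ofList (arr.map pvKey)).filter (fun c => pvCnt arr c == pvCnt arr m) := by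
    rw [List.filter_map, List.map_map]
    simp [Function.comp_def]
  have hhead : ((PySem.Set.ofList (arr.map pvKey)).filter
        (fun c => pvCnt arr c == pvCnt arr m)).headD 0 = m := by
    rw [List.headD_eq_head?_getD, pvMax?_first (pvCnt arr) _ m hm]; rfl
  -- B's grouping loop
  have hG : (arr.foldl (fun d sublist =>
      d.modify (PySem.List.pyGetD sublist 1 0) [] (fun g => g ++ [sublist])) PySem.Dict.empty)
      = (arr.map (fun s => (pvKey s, s))).foldl
          (fun d p => d.modify p.1 [] (fun g => g ++ [p.2])) PySem.Dict.empty := by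
    rw [List.foldl_map]; rfl
  have hGkeys : (arr.foldl (fun d sublist =>
      d.modify (PySem.List.pyGetD sublist 1 0) [] (fun g => g ++ [sublist])) PySem.Dict.empty).keys
      = PySem.Set.ofList (arr.map pvKey) := by
    show (List.foldl (fun d s => d.modify (pvKey s) [] fun g => g ++ [s]) PySem.Dict.empty arr).keys
      = PySem.Set.ofList (arr.map pvKey)
    rw [PySem.Dict.keys_foldl_modify_key arr pvKey [] (fun _ s => (fun g => g ++ [s])) PySem.Dict.empty]
    rw [PySem.Dict.keys_empty]
    rfl
  have hGnodup : (arr.foldl (fun d sublist =>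
      d.modify (PySem.List.pyGetD sublist 1 0) [] (fun g => g ++ [sublist])) PySem.Dict.empty).keys.Nodup :=
    PySem.Dict.nodup_keys_foldl_modify_key arr pvKey [] (fun _ s => (fun g => g ++ [s]))
      PySem.Dict.empty PySem.Dict.nodup_keys_empty
  have hGgetD : ∀ c, (arr.foldl (fun d sublist =>
      d.modify (PySem.List.pyGetD sublist 1 0) [] (fun g => g ++ [sublist])) PySem.Dict.empty).getD c []
      = pvGrp arr c := by
    intro c
    rw [hG, PySem.Dict.getD_foldl_modify_append]
    simp [pvGrp, List.filter_map, List.map_map, Function.comp_def]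
  have hvalsB : (arr.foldl (fun d sublist =>
      d.modify (PySem.List.pyGetD sublist 1 0) [] (fun g => g ++ [sublist])) PySem.Dict.empty).values
      = (PySem.Set.ofList (arr.map pvKey)).map (pvGrp arr) := by
    rw [PySem.Dict.values_eq_map_keys _ hGnodup [], hGkeys]
    exact List.map_congr_left (fun c _ => hGgetD c)
  have hmaxB : PySem.List.max? ((PySem.Set.ofList (arr.map pvKey)).map (pvGrp arr))
        (fun g => (g.length : Int)) = some (pvGrp arr m) := by
    rw [pvMax?_map (pvGrp arr) (fun g => (g.length : Int)) (pvCnt arr) _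
        (fun c _ => pvCnt_eq_len arr c), hm]
    rfl
  simp only [filter_arrays, filter_arrays_alt]
  rw [hA, hvalsA, hmax, hvalsB, hmaxB]
  simp only [Option.getD_some]
  rw [hitems, hmost, hhead]
  rfl

theorem filter_arrays_spec : Claim_equal_filter_arrays := by
  intro arr max_val _hdom hpre
  exact filter_arrays_eq arr max_val hpre.1
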